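-- pv_equiv track=rewrite | github.com/hacetheworld/competitive-programming-practices | problems/Rest_in_peace.py | Solution
-- ===== SOURCE A (Python) =====
-- def Solution(num):
--     if num % 21 == 0:
--         return True
--     while num != 0:
--         if(num % 100 == 21):
--             return True
--
--         num = num//10
--     return False
-- ===== SOURCE B (Python) =====
-- def Solution(num):
--     return num % 21 == 0 or '21' in str(num)
-- ===== Notes on version B (the rewrite author's own statement) =====
-- stated objective: idiomatic
-- what changed: Replaced the digit-peeling while loop (num % 100 == 21, num //= 10) with a direct substring test '21' in str(num), traversing the decimal text instead of doing repeated arithmetic.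
-- outside the precondition, e.g. on Solution(-79): A returns True, B returns False; on Solution(-5): A does not finish within the time limit, B returns False
import Mathlib
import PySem

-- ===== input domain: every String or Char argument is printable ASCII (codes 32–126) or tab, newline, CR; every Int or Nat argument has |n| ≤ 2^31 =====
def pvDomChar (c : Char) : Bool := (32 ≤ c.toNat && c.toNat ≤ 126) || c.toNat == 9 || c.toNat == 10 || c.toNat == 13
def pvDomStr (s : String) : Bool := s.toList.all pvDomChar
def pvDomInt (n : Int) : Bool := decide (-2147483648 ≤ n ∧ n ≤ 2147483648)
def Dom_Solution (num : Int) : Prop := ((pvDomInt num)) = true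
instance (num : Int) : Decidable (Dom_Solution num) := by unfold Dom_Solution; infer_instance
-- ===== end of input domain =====

-- B replaces A's digit-peeling while loop by the idiomatic substring test `'21' in str(num)`;
-- equivalence is proved for num ≥ 0 (on negative num A's loop diverges or returns by accident).


-- ===== PORT A =====
-- A's `while num != 0` loop; the fuel argument only makes the recursion total
-- (num.natAbs + 1 iterations always suffice for num ≥ 0, since num //= 10 shrinks num).
def SolutionLoop : Nat → Int → Bool
  | 0, _ => false
  | fuel + 1, num =>
    if num = 0 then false
    else if PySem.Int.mod num 100 = 21 then true
    else SolutionLoop fuel (PySem.Int.floordiv num 10)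

def Solution (num : Int) : Bool :=
  if PySem.Int.mod num 21 = 0 then true
  else SolutionLoop (num.natAbs + 1) num

-- ===== PORT B =====
def Solution_alt (num : Int) : Bool :=
  (PySem.Int.mod num 21 = 0) || PySem.Str.isIn "21" (PySem.Int.toStr num)

-- ===== PRECONDITION & SPEC =====
-- Pre_ excludes negative num: there A's while loop fails to terminate for most values
-- (Python floor division keeps negatives negative), and when it does return True it is via
-- Python's always-nonnegative modulo hitting 21, an accident of the loop that B does not share.
def Pre_Solution (num : Int) : Prop := 0 ≤ num
instance (num : Int) : Decidable (Pre_Solution num) := by unfold Pre_Solution; infer_instance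
def pvWitness_Solution : Int := (121)

def Spec_Solution (num : Int) (out : Bool) : Prop := out = Solution_alt num
instance (num : Int) (out : Bool) : Decidable (Spec_Solution num out) := by unfold Spec_Solution; infer_instance

-- ===== CLAIM (what is proved, stated in full; the proofs are below) =====
def Claim_equal_Solution : Prop := ∀ (num : Int), Dom_Solution num → Pre_Solution num → Spec_Solution num (Solution num)

-- ===== LEMMAS AND PROOFS =====

-- A's loop on Nat, by well-founded recursion (fuel-free reference form).
def natLoop (n : Nat) : Bool :=
  if h : n = 0 then false
  else if n % 100 = 21 then true
  else natLoop (n / 10)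
decreasing_by exact Nat.div_lt_self (Nat.pos_of_ne_zero h) (by omega)

lemma solutionLoop_eq_natLoop : ∀ (fuel n : Nat), n < fuel →
    SolutionLoop fuel (n : Int) = natLoop n := by
  intro fuel
  induction fuel with
  | zero => intro n h; omega
  | succ f ih =>
    intro n h
    rw [natLoop, SolutionLoop]
    by_cases h0 : n = 0
    · simp [h0]
    · have hne : (n : Int) ≠ 0 := by exact_mod_cast h0
      simp only [hne, if_false, h0, dif_neg, not_false_iff]
      have hm : PySem.Int.mod (n : Int) 100 = ((n % 100 : Nat) : Int) := by
        exact_mod_cast PySem.Int.mod_natCast n 100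
      have hd : PySem.Int.floordiv (n : Int) 10 = ((n / 10 : Nat) : Int) := by
        exact_mod_cast PySem.Int.floordiv_natCast n 10
      rw [hm, hd]
      by_cases h21 : n % 100 = 21
      · simp [h21]
      · have : ((n % 100 : Nat) : Int) ≠ (21 : Int) := by exact_mod_cast h21
        simp only [this, if_false, h21]
        exact ih (n / 10) (by omega)

-- toDigitsCore: the accumulator is appended.
lemma toDigitsCore_acc : ∀ (fuel n : Nat) (ds : List Char),
    Nat.toDigitsCore 10 fuel n ds = Nat.toDigitsCore 10 fuel n [] ++ ds := by
  intro fuel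
  induction fuel with
  | zero => intro n ds; simp [Nat.toDigitsCore]
  | succ f ih =>
    intro n ds
    simp only [Nat.toDigitsCore]
    by_cases h : n / 10 = 0
    · simp [h]
    · simp only [h, if_false]
      rw [ih (n / 10) ((n % 10).digitChar :: ds), ih (n / 10) [(n % 10).digitChar]]
      simp

-- toDigitsCore: fuel-irrelevance (any fuel > n works).
lemma toDigitsCore_fuel : ∀ (f g n : Nat), n < f → n < g →
    Nat.toDigitsCore 10 f n [] = Nat.toDigitsCore 10 g n [] := by
  intro f
  induction f with
  | zero => intro g n h; omega
  | succ f ih =>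
    intro g n hf hg
    cases g with
    | zero => omega
    | succ g =>
      simp only [Nat.toDigitsCore]
      by_cases h : n / 10 = 0
      · simp [h]
      · simp only [h, if_false]
        rw [toDigitsCore_acc f, toDigitsCore_acc g]
        rw [ih g (n / 10) (by omega) (by omega)]

lemma toDigits_lt_ten {n : Nat} (h : n < 10) :
    Nat.toDigits 10 n = [Nat.digitChar n] := by
  simp [Nat.toDigits, Nat.toDigitsCore, Nat.div_eq_of_lt h, Nat.mod_eq_of_lt h]

lemma toDigits_rec {n : Nat} (h : 10 ≤ n) :
    Nat.toDigits 10 n = Nat.toDigits 10 (n / 10) ++ [Nat.digitChar (n % 10)] := by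
  have h10 : n / 10 ≠ 0 := by omega
  rw [Nat.toDigits, Nat.toDigitsCore]
  simp only [h10, if_false]
  rw [toDigitsCore_acc, Nat.toDigits]
  rw [toDigitsCore_fuel n (n / 10 + 1) (n / 10) (by omega) (by omega)]

lemma toDigits_getLast? (n : Nat) :
    (Nat.toDigits 10 n).getLast? = some (Nat.digitChar (n % 10)) := by
  by_cases h : n < 10
  · rw [toDigits_lt_ten h, Nat.mod_eq_of_lt h]; rfl
  · rw [toDigits_rec (by omega)]
    simp

lemma digitChar_eq_two {d : Nat} (hd : d < 10) : Nat.digitChar d = '2' ↔ d = 2 := by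
  interval_cases d <;> simp [Nat.digitChar]

lemma digitChar_eq_one {d : Nat} (hd : d < 10) : Nat.digitChar d = '1' ↔ d = 1 := by
  interval_cases d <;> simp [Nat.digitChar]

lemma isIn21_singleton (c : Char) : PySem.Chars.isIn ['2', '1'] [c] = false := by
  apply (PySem.Chars.isIn_eq_false_iff _ _).mpr
  intro h
  have := h.length_le
  simp at this

-- "21" infix of s ++ [c] ↔ infix of s, or s ends in '2' and c = '1'.
lemma infix21_append_singleton (s : List Char) (c : Char) :
    ['2', '1'] <:+: s ++ [c] ↔ ['2', '1'] <:+: s ∨ (s.getLast? = some '2' ∧ c = '1') := by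
  constructor
  · rintro ⟨pre, post, hpp⟩
    rcases post.eq_nil_or_concat with hpost | ⟨q, d, rfl⟩
    · subst hpost
      right
      simp only [List.append_nil] at hpp
      have : s = pre ++ ['2'] ∧ c = '1' := by
        have := hpp.symm
        rw [show pre ++ ['2', '1'] = (pre ++ ['2']) ++ ['1'] by simp] at this
        have h2 := List.append_inj' this (by rfl)
        exact ⟨h2.1, by simpa using h2.2⟩
      refine ⟨by rw [this.1]; simp, this.2⟩
    · left
      simp only [List.concat_eq_append] at hpp
      rw [show pre ++ ['2', '1'] ++ (q ++ [d]) = (pre ++ ['2', '1'] ++ q) ++ [d] by simp] at hpp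
      have h2 := List.append_inj' hpp (by rfl)
      exact ⟨pre, q, by simpa using h2.1⟩
  · rintro (⟨pre, post, rfl⟩ | ⟨hlast, rfl⟩)
    · exact ⟨pre, post ++ [c], by simp⟩
    · have hne : s ≠ [] := by rintro rfl; simp at hlast
      have hg : s.getLast hne = '2' := by
        rw [List.getLast?_eq_some_getLast hne] at hlast
        exact Option.some_inj.mp hlast
      have hs : s = s.dropLast ++ ['2'] := by
        conv_lhs => rw [← s.dropLast_append_getLast hne]
        rw [hg]
      exact ⟨s.dropLast, [], by rw [hs]; simp⟩

-- main characterisation on Nat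
lemma natLoop_eq_isIn (n : Nat) :
    natLoop n = PySem.Chars.isIn ['2', '1'] (Nat.toDigits 10 n) := by
  induction n using Nat.strong_induction_on with
  | _ n ih =>
    by_cases hsmall : n < 10
    · rw [toDigits_lt_ten hsmall, natLoop]
      have h21 : ¬ (n % 100 = 21) := by omega
      by_cases h0 : n = 0
      · simp only [h0, dif_pos]
        decide
      · simp only [h0, dif_neg, not_false_iff, h21, if_false]
        rw [natLoop]
        have : n / 10 = 0 := by omega
        rw [this]
        simp only [dif_pos]
        rw [isIn21_singleton]
    · have h0 : n ≠ 0 := by omega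
      rw [natLoop, toDigits_rec (by omega)]
      simp only [h0, dif_neg, not_false_iff]
      have hrhs : PySem.Chars.isIn ['2', '1'] (Nat.toDigits 10 (n / 10) ++ [Nat.digitChar (n % 10)])
          = (PySem.Chars.isIn ['2', '1'] (Nat.toDigits 10 (n / 10)) || decide (n % 100 = 21)) := by
        cases hb : PySem.Chars.isIn ['2', '1'] (Nat.toDigits 10 (n / 10) ++ [Nat.digitChar (n % 10)]) with
        | false =>
          have hnot := (PySem.Chars.isIn_eq_false_iff ['2', '1'] (Nat.toDigits 10 (n / 10) ++ [Nat.digitChar (n % 10)])).mp hb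
          rw [infix21_append_singleton] at hnot
          rw [not_or, not_and_or] at hnot
          obtain ⟨hn1, hn2⟩ := hnot
          have hb1 : PySem.Chars.isIn ['2', '1'] (Nat.toDigits 10 (n / 10)) = false :=
            (PySem.Chars.isIn_eq_false_iff _ _).mpr hn1
          have hb2 : ¬ (n % 100 = 21) := by
            intro hmod
            rcases hn2 with hn2 | hn2
            · apply hn2
              rw [toDigits_getLast?]
              congr 1
              rw [digitChar_eq_two (by omega)]
              omega
            · apply hn2
              rw [digitChar_eq_one (by omega)]
              omega
          simp [hb1, hb2]
        | true =>
          have hinf := (PySem.Chars.isIn_iff_infix ['2', '1'] (Nat.toDigits 10 (n / 10) ++ [Nat.digitChar (n % 10)])).mp hb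
          rw [infix21_append_singleton] at hinf
          rcases hinf with hinf | ⟨hlast, hone⟩
          · have : PySem.Chars.isIn ['2', '1'] (Nat.toDigits 10 (n / 10)) = true :=
              (PySem.Chars.isIn_iff_infix _ _).mpr hinf
            simp [this]
          · rw [toDigits_getLast?] at hlast
            have h2 : (n / 10) % 10 = 2 := by
              have := Option.some_inj.mp hlast
              rwa [digitChar_eq_two (by omega)] at this
            have h1 : n % 10 = 1 := by
              rwa [digitChar_eq_one (by omega)] at hone
            have : n % 100 = 21 := by omega
            simp [this]
      rw [hrhs, ih (n / 10) (by omega)]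
      by_cases h21 : n % 100 = 21 <;> simp [h21, Bool.or_comm]

-- ===== VERDICT (by name: the statement is the Claim_ definition above) =====
theorem Solution_spec : Claim_equal_Solution := by
  intro num _ hpre
  have hge : (0 : Int) ≤ num := hpre
  unfold Spec_Solution Solution Solution_alt
  by_cases h21 : PySem.Int.mod num 21 = 0
  · rw [if_pos h21]
    have hd : decide (PySem.Int.mod num 21 = 0) = true := by
      simp
      exact (PySem.Int.mod_eq_zero_iff_dvd _ _).mp h21
    rw [hd, Bool.true_or]
  · rw [if_neg h21]
    have hd : decide (PySem.Int.mod num 21 = 0) = false := by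
      simp
      exact fun hdvd => h21 ((PySem.Int.mod_eq_zero_iff_dvd _ _).mpr hdvd)
    rw [hd, Bool.false_or]
    obtain ⟨m, rfl⟩ : ∃ m : Nat, num = (m : Int) := ⟨num.toNat, by omega⟩
    rw [PySem.Str.isIn_eq, PySem.Int.toList_toStr]
    have htc : PySem.Int.toChars (m : Int) = Nat.toDigits 10 m := by
      unfold PySem.Int.toChars
      simp
    rw [htc]
    have hnat : (m : Int).natAbs + 1 = m + 1 := by simp
    rw [hnat, solutionLoop_eq_natLoop (m + 1) m (by omega), natLoop_eq_isIn]
    rfl
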